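-- pv_equiv track=rewrite | github.com/Ftywan/AI-Concepts-and-Hands-On | Assignment 1/a1.py | mystery_code
-- ===== SOURCE A (Python) =====
-- def mystery_code(string):
-- 	new_string = ''
-- 	for i in range(len(string)):
-- 		ascii_num = ord(string[i])
-- 		# upper case
-- 		if ascii_num >= 97 and ascii_num <= 122:
-- 			encoded = chr((ascii_num - 97 + 21) % 26 + 65)
-- 			new_string = new_string + encoded
-- 		# lower case
-- 		elif ascii_num >= 65 and ascii_num <= 90:
-- 			encoded = chr((ascii_num - 65 + 21) % 26 + 97)
-- 			new_string = new_string + encoded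
-- 		else:
-- 			new_string = new_string + string[i]
--
-- 	return new_string
-- ===== SOURCE B (Python) =====
-- def mystery_code(string):
--     table = {}
--     for c in range(26):
--         table[97 + c] = chr((c + 21) % 26 + 65)
--         table[65 + c] = chr((c + 21) % 26 + 97)
--     return string.translate(table)
-- ===== Notes on version B (the rewrite author's own statement) =====
-- stated objective: idiomatic
-- what changed: Replaces the per-character branch-and-compute loop with explicit string concatenation by a 52-entry translation table built once and a single str.translate call.
import Mathlib
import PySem

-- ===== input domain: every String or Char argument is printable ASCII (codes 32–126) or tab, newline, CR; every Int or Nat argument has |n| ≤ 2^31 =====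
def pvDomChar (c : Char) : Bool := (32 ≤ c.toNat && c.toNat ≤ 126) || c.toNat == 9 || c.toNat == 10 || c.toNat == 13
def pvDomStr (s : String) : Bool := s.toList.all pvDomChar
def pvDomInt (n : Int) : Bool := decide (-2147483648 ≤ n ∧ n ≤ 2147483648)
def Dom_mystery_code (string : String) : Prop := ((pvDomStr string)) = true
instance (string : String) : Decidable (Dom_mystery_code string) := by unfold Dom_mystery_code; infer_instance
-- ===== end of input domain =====

-- B builds the case-swapping +21-shift translation table once and translates in one pass,
-- instead of A's per-character branch-and-compute loop with string concatenation (objective: idiomatic).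

-- ===== PORT A =====
-- accumulator kept as List Char (Python's growing string), rebuilt into a String at the end;
-- string[i] via pyGetD (index always in range here), ord/chr via Char.toNat/Char.ofNat — exact on ASCII.
def mystery_code (string : String) : String :=
  let cs := string.toList
  String.ofList ((PySem.List.pyRange 0 (cs.length : Int) 1).foldl
    (fun new_string i =>
      let ch := PySem.List.pyGetD cs i ' '
      let ascii_num : Int := (ch.toNat : Int)
      if 97 ≤ ascii_num ∧ ascii_num ≤ 122 then
        new_string ++ [Char.ofNat (PySem.Int.mod (ascii_num - 97 + 21) 26 + 65).toNat]
      else if 65 ≤ ascii_num ∧ ascii_num ≤ 90 then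
        new_string ++ [Char.ofNat (PySem.Int.mod (ascii_num - 65 + 21) 26 + 97).toNat]
      else
        new_string ++ [ch]) [])

-- ===== PORT B =====
-- the translation table: Python dict keyed by code points (int), built by one loop over range(26)
def pvTable : PySem.Dict Int Char :=
  (PySem.List.pyRange 0 26 1).foldl
    (fun table c =>
      (table.insert (97 + c) (Char.ofNat (PySem.Int.mod (c + 21) 26 + 65).toNat)).insert
        (65 + c) (Char.ofNat (PySem.Int.mod (c + 21) 26 + 97).toNat))
    PySem.Dict.empty

-- str.translate: map each character through the table, unmapped characters unchanged
def mystery_code_alt (string : String) : String :=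
  String.ofList (string.toList.map (fun ch => pvTable.getD (ch.toNat : Int) ch))

-- ===== PRECONDITION & SPEC =====
def Spec_mystery_code (string : String) (out : String) : Prop := out = mystery_code_alt string
instance (string : String) (out : String) : Decidable (Spec_mystery_code string out) := by unfold Spec_mystery_code; infer_instance

-- ===== CLAIM (what is proved, stated in full; the proofs are below) =====
def Claim_equal_mystery_code : Prop := ∀ (string : String), Dom_mystery_code string → Spec_mystery_code string (mystery_code string)

-- ===== LEMMAS AND PROOFS =====

-- A's per-character value equals B's table lookup, for every character of the domain
set_option maxRecDepth 8192 in
set_option maxHeartbeats 1000000 in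
theorem pv_char_step_fin : ∀ (m : Fin 128),
    (let ch := Char.ofNat m.val
     let ascii_num : Int := (ch.toNat : Int)
     (if 97 ≤ ascii_num ∧ ascii_num ≤ 122 then
        Char.ofNat (PySem.Int.mod (ascii_num - 97 + 21) 26 + 65).toNat
      else if 65 ≤ ascii_num ∧ ascii_num ≤ 90 then
        Char.ofNat (PySem.Int.mod (ascii_num - 65 + 21) 26 + 97).toNat
      else ch) = pvTable.getD ((ch.toNat : Int)) ch) := by decide

theorem pv_char_step (ch : Char) (h : pvDomChar ch = true) :
    (if 97 ≤ (ch.toNat : Int) ∧ (ch.toNat : Int) ≤ 122 then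
        Char.ofNat (PySem.Int.mod ((ch.toNat : Int) - 97 + 21) 26 + 65).toNat
      else if 65 ≤ (ch.toNat : Int) ∧ (ch.toNat : Int) ≤ 90 then
        Char.ofNat (PySem.Int.mod ((ch.toNat : Int) - 65 + 21) 26 + 97).toNat
      else ch) = pvTable.getD ((ch.toNat : Int)) ch := by
  have hlt : ch.toNat < 128 := by
    unfold pvDomChar at h
    simp only [Bool.or_eq_true, Bool.and_eq_true, decide_eq_true_eq, beq_iff_eq] at h
    omega
  have hc : Char.ofNat ch.toNat = ch := Char.ofNat_toNat ch
  have := pv_char_step_fin ⟨ch.toNat, hlt⟩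
  simpa [hc] using this

-- ===== VERDICT (by name: the statement is the Claim_ definition above) =====
theorem mystery_code_spec : Claim_equal_mystery_code := by
  intro s hdom
  show mystery_code s = mystery_code_alt s
  unfold mystery_code mystery_code_alt
  simp only []
  congr 1
  rw [PySem.List.foldl_pyRange_zero_pyGetD' s.toList ' '
      (fun new_string ch =>
        if 97 ≤ (ch.toNat : Int) ∧ (ch.toNat : Int) ≤ 122 then
          new_string ++ [Char.ofNat (PySem.Int.mod ((ch.toNat : Int) - 97 + 21) 26 + 65).toNat]
        else if 65 ≤ (ch.toNat : Int) ∧ (ch.toNat : Int) ≤ 90 then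
          new_string ++ [Char.ofNat (PySem.Int.mod ((ch.toNat : Int) - 65 + 21) 26 + 97).toNat]
        else new_string ++ [ch]) []]
  have hshape := PySem.List.foldl_append_singleton_eq_map
    (f := fun ch =>
      if 97 ≤ (ch.toNat : Int) ∧ (ch.toNat : Int) ≤ 122 then
        Char.ofNat (PySem.Int.mod ((ch.toNat : Int) - 97 + 21) 26 + 65).toNat
      else if 65 ≤ (ch.toNat : Int) ∧ (ch.toNat : Int) ≤ 90 then
        Char.ofNat (PySem.Int.mod ((ch.toNat : Int) - 65 + 21) 26 + 97).toNat
      else ch) (l := s.toList) (acc := [])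
  rw [show (fun (new_string : List Char) (ch : Char) =>
        if 97 ≤ (ch.toNat : Int) ∧ (ch.toNat : Int) ≤ 122 then
          new_string ++ [Char.ofNat (PySem.Int.mod ((ch.toNat : Int) - 97 + 21) 26 + 65).toNat]
        else if 65 ≤ (ch.toNat : Int) ∧ (ch.toNat : Int) ≤ 90 then
          new_string ++ [Char.ofNat (PySem.Int.mod ((ch.toNat : Int) - 65 + 21) 26 + 97).toNat]
        else new_string ++ [ch]) =
      (fun (acc : List Char) (ch : Char) => acc ++
        [if 97 ≤ (ch.toNat : Int) ∧ (ch.toNat : Int) ≤ 122 then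
          Char.ofNat (PySem.Int.mod ((ch.toNat : Int) - 97 + 21) 26 + 65).toNat
        else if 65 ≤ (ch.toNat : Int) ∧ (ch.toNat : Int) ≤ 90 then
          Char.ofNat (PySem.Int.mod ((ch.toNat : Int) - 65 + 21) 26 + 97).toNat
        else ch]) from by
        funext acc ch; split_ifs <;> rfl]
  rw [hshape]
  simp only [List.nil_append]
  apply List.map_congr_left
  intro ch hch
  exact pv_char_step ch (by
    have := hdom
    unfold Dom_mystery_code pvDomStr at this
    exact List.all_eq_true.mp this ch hch)
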